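-- pv_equiv track=rewrite | github.com/Uchihayht/iDeepMV | ideepmv.py | coutSameAndDifferend
-- ===== SOURCE A (Python) =====
-- def coutSameAndDifferend(preds, result):
--     all = len(preds) * len(preds[1])
--     total = 0
--     same = 0
--     error = 0
--     forget = 0
--     for i in range(len(preds)):
--         for j in range(len(preds[i])):
--             if result[i][j] == 1 and preds[i][j] == 1:
--                 total += 1
--                 same += 1
--             elif result[i][j] == 1 and preds[i][j] == 0:
--                 total += 1
--                 forget += 1
--             elif result[i][j] == 0 and preds[i][j] == 1:
--                 error += 1
--     return total, same, error, all, forget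
-- ===== SOURCE B (Python) =====
-- def coutSameAndDifferend(preds, result):
--     pairs = [(r, p) for prow, rrow in zip(preds, result) for p, r in zip(prow, rrow)]
--     same = pairs.count((1, 1))
--     forget = pairs.count((1, 0))
--     error = pairs.count((0, 1))
--     return same + forget, same, error, len(preds) * len(preds[1]), forget
-- ===== Notes on version B (the rewrite author's own statement) =====
-- stated objective: simpler
-- what changed: B flattens the zipped (result, pred) cell pairs into one list and reads off all four tallies with list.count, replacing A's index-based nested loop that updates four accumulators through a three-way branch.
import Mathlib
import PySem

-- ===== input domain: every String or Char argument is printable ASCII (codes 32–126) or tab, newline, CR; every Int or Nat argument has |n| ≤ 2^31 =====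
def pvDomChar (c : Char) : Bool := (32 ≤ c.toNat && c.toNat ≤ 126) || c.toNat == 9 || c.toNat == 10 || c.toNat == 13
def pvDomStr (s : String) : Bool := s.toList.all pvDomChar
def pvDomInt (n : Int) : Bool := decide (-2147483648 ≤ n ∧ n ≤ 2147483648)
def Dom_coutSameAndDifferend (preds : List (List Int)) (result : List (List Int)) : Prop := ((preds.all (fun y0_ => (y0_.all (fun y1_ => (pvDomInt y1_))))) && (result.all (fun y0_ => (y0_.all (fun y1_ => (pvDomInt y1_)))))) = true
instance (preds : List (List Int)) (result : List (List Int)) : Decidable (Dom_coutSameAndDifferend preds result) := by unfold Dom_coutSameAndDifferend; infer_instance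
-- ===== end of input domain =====

-- B replaces A's index-based nested loop with four branch-updated accumulators by flattening
-- the zipped (result, pred) cell pairs into one list and reading the tallies off with count.

-- ===== PORT A =====
def coutSameAndDifferend (preds : List (List Int)) (result : List (List Int)) : Int × Int × Int × Int × Int :=
  -- all = len(preds) * len(preds[1]); preds[1] raises IndexError when len(preds) < 2 — excluded by Pre_
  let all : Int := (preds.length : Int) * ((PySem.List.pyGetD preds 1 []).length : Int)
  let st := (PySem.List.pyRange 0 (preds.length : Int) 1).foldl
    (fun st i =>
      (PySem.List.pyRange 0 ((PySem.List.pyGetD preds i []).length : Int) 1).foldl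
        (fun st j =>
          if PySem.List.pyGetD (PySem.List.pyGetD result i []) j 0 = 1 ∧
             PySem.List.pyGetD (PySem.List.pyGetD preds i []) j 0 = 1 then
            (st.1 + 1, st.2.1 + 1, st.2.2.1, st.2.2.2)
          else if PySem.List.pyGetD (PySem.List.pyGetD result i []) j 0 = 1 ∧
                  PySem.List.pyGetD (PySem.List.pyGetD preds i []) j 0 = 0 then
            (st.1 + 1, st.2.1, st.2.2.1, st.2.2.2 + 1)
          else if PySem.List.pyGetD (PySem.List.pyGetD result i []) j 0 = 0 ∧
                  PySem.List.pyGetD (PySem.List.pyGetD preds i []) j 0 = 1 then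
            (st.1, st.2.1, st.2.2.1 + 1, st.2.2.2)
          else st)
        st)
    ((0, 0, 0, 0) : Int × Int × Int × Int)
  (st.1, st.2.1, st.2.2.1, all, st.2.2.2)

-- ===== PORT B =====
def coutSameAndDifferend_alt (preds : List (List Int)) (result : List (List Int)) : Int × Int × Int × Int × Int :=
  let pairs : List (Int × Int) :=
    (preds.zip result).flatMap (fun x => (x.1.zip x.2).map (fun y => (y.2, y.1)))
  let same : Int := pairs.count (1, 1)
  let forget : Int := pairs.count (1, 0)
  let error : Int := pairs.count (0, 1)
  (same + forget, same, error, (preds.length : Int) * ((PySem.List.pyGetD preds 1 []).length : Int), forget)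

-- ===== PRECONDITION & SPEC =====
-- Exactly the inputs on which Python A returns: preds[1] must exist, and every row of preds
-- that the inner loop actually enters (a nonempty one) needs a result row at least as long.
def Pre_coutSameAndDifferend (preds : List (List Int)) (result : List (List Int)) : Prop :=
  2 ≤ preds.length ∧
  ∀ i : Nat, i < preds.length → preds.getD i [] = [] ∨
    (i < result.length ∧ (preds.getD i []).length ≤ (result.getD i []).length)
instance (preds : List (List Int)) (result : List (List Int)) : Decidable (Pre_coutSameAndDifferend preds result) := by
  unfold Pre_coutSameAndDifferend; infer_instance

def pvWitness_coutSameAndDifferend : List (List Int) × List (List Int) :=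
  ([[1, 0], [0, 1]], [[1, 1], [0, 0]])

def Spec_coutSameAndDifferend (preds : List (List Int)) (result : List (List Int)) (out : Int × Int × Int × Int × Int) : Prop := out = coutSameAndDifferend_alt preds result
instance (preds : List (List Int)) (result : List (List Int)) (out : Int × Int × Int × Int × Int) : Decidable (Spec_coutSameAndDifferend preds result out) := by unfold Spec_coutSameAndDifferend; infer_instance

-- ===== CLAIM (what is proved, stated in full; the proofs are below) =====
def Claim_equal_coutSameAndDifferend : Prop := ∀ (preds : List (List Int)) (result : List (List Int)), Dom_coutSameAndDifferend preds result → Pre_coutSameAndDifferend preds result → Spec_coutSameAndDifferend preds result (coutSameAndDifferend preds result)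

-- ===== LEMMAS AND PROOFS =====

-- A fold whose step fixes every member of the list returns its initial state.
theorem pvFoldlFix {σ α : Type} (l : List α) (f : σ → α → σ) (st : σ)
    (h : ∀ x ∈ l, ∀ s, f s x = s) : l.foldl f st = st := by
  induction l generalizing st with
  | nil => rfl
  | cons x tl ih =>
    simp only [List.foldl_cons, h x (by simp)]
    exact ih st (fun y hy s => h y (by simp [hy]) s)

-- An index loop 'for j in range(a, len(zip)) : … p[j] … r[j] …' is a fold over the zip's tail.
theorem pvFoldlRangeZip {α β σ : Type} (g : σ → α → β → σ) (dp : α) (dr : β) :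
    ∀ (n a : Nat) (p : List α) (r : List β) (st : σ), n = (p.zip r).length - a →
      (PySem.List.pyRange (a : Int) (((p.zip r).length : Nat) : Int) 1).foldl
          (fun st j => g st (PySem.List.pyGetD p j dp) (PySem.List.pyGetD r j dr)) st
        = ((p.zip r).drop a).foldl (fun st x => g st x.1 x.2) st := by
  intro n
  induction n with
  | zero =>
    intro a p r st h
    rw [PySem.List.pyRange_one_eq_nil (by exact_mod_cast Nat.le_of_sub_eq_zero h.symm),
        List.drop_eq_nil_of_le (Nat.le_of_sub_eq_zero h.symm)]
    simp only [List.foldl_nil]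
  | succ n ih =>
    intro a p r st h
    have ha : a < (p.zip r).length := by omega
    have hap : a < p.length := by simp [List.length_zip] at ha; omega
    have har : a < r.length := by simp [List.length_zip] at ha; omega
    rw [PySem.List.pyRange_one_cons (by exact_mod_cast ha), List.drop_eq_getElem_cons ha]
    simp only [List.foldl_cons, List.getElem_zip,
      PySem.List.pyGetD_natCast, List.getD_eq_getElem _ _ hap, List.getD_eq_getElem _ _ har]
    have := ih (a + 1) p r
      (g st (p[a]) (r[a])) (by omega)
    exact_mod_cast this

-- The branch-updating loop body of A counted over a list of (pred, result) cell pairs.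
theorem pvCountFold :
    ∀ (l : List (Int × Int)) (t s e f : Int),
      l.foldl
        (fun st x =>
          if x.2 = 1 ∧ x.1 = 1 then (st.1 + 1, st.2.1 + 1, st.2.2.1, st.2.2.2)
          else if x.2 = 1 ∧ x.1 = 0 then (st.1 + 1, st.2.1, st.2.2.1, st.2.2.2 + 1)
          else if x.2 = 0 ∧ x.1 = 1 then (st.1, st.2.1, st.2.2.1 + 1, st.2.2.2)
          else st) ((t, s, e, f) : Int × Int × Int × Int)
      = (t + l.count (1, 1) + l.count (0, 1),
         s + l.count (1, 1),
         e + l.count (1, 0),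
         f + l.count (0, 1)) := by
  intro l
  induction l with
  | nil => intro t s e f; simp
  | cons x tl ih =>
    intro t s e f
    obtain ⟨p, r⟩ := x
    simp only [List.foldl_cons]
    by_cases h1 : r = 1 ∧ p = 1
    · rw [if_pos h1, ih]
      obtain ⟨hr, hp⟩ := h1; subst hr; subst hp
      simp only [List.count_cons, beq_iff_eq, Prod.ext_iff]
      norm_num; omega
    · by_cases h2 : r = 1 ∧ p = 0
      · rw [if_neg h1, if_pos h2, ih]
        obtain ⟨hr, hp⟩ := h2; subst hr; subst hp
        simp only [List.count_cons, beq_iff_eq, Prod.ext_iff]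
        norm_num; omega
      · by_cases h3 : r = 0 ∧ p = 1
        · rw [if_neg h1, if_neg h2, if_pos h3, ih]
          obtain ⟨hr, hp⟩ := h3; subst hr; subst hp
          simp only [List.count_cons, beq_iff_eq, Prod.ext_iff]
          norm_num; omega
        · rw [if_neg h1, if_neg h2, if_neg h3, ih]
          simp only [List.count_cons, beq_iff_eq, Prod.mk.injEq]
          split_ifs <;> simp_all

-- Outer loop over zipped rows: A's per-row inner index loop tallies exactly the pair counts
-- of the flattened zipped cells.
theorem pvOuter (zl : List (List Int × List Int))
    (hrow : ∀ x ∈ zl, (x.1.zip x.2).length = x.1.length) :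
    ∀ t s e f : Int,
      zl.foldl
        (fun st x =>
          (PySem.List.pyRange 0 (x.1.length : Int) 1).foldl
            (fun st j =>
              if PySem.List.pyGetD x.2 j 0 = 1 ∧ PySem.List.pyGetD x.1 j 0 = 1 then
                (st.1 + 1, st.2.1 + 1, st.2.2.1, st.2.2.2)
              else if PySem.List.pyGetD x.2 j 0 = 1 ∧ PySem.List.pyGetD x.1 j 0 = 0 then
                (st.1 + 1, st.2.1, st.2.2.1, st.2.2.2 + 1)
              else if PySem.List.pyGetD x.2 j 0 = 0 ∧ PySem.List.pyGetD x.1 j 0 = 1 then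
                (st.1, st.2.1, st.2.2.1 + 1, st.2.2.2)
              else st)
            st)
        ((t, s, e, f) : Int × Int × Int × Int)
      = (t + (zl.flatMap (fun x => x.1.zip x.2)).count (1, 1)
           + (zl.flatMap (fun x => x.1.zip x.2)).count (0, 1),
         s + (zl.flatMap (fun x => x.1.zip x.2)).count (1, 1),
         e + (zl.flatMap (fun x => x.1.zip x.2)).count (1, 0),
         f + (zl.flatMap (fun x => x.1.zip x.2)).count (0, 1)) := by
  induction zl with
  | nil => intro t s e f; simp
  | cons x tl ih =>
    intro t s e f
    have hx : (x.1.zip x.2).length = x.1.length := hrow x (by simp)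
    simp only [List.foldl_cons]
    rw [show ((x.1.length : Int)) = (((x.1.zip x.2).length : Nat) : Int) by exact_mod_cast hx.symm]
    have H := pvFoldlRangeZip
      (g := fun st p r =>
        if r = 1 ∧ p = 1 then (st.1 + 1, st.2.1 + 1, st.2.2.1, st.2.2.2)
        else if r = 1 ∧ p = 0 then (st.1 + 1, st.2.1, st.2.2.1, st.2.2.2 + 1)
        else if r = 0 ∧ p = 1 then (st.1, st.2.1, st.2.2.1 + 1, st.2.2.2)
        else st)
      (0 : Int) (0 : Int) ((x.1.zip x.2).length) 0 x.1 x.2 ((t, s, e, f) : Int × Int × Int × Int) (by omega)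
    simp only [Nat.cast_zero, List.drop_zero] at H
    rw [H]
    rw [pvCountFold]
    rw [ih (fun y hy => hrow y (by simp [hy]))]
    simp only [List.flatMap_cons, List.count_append, Prod.ext_iff]
    push_cast; refine ⟨by ring, by ring, by ring, by ring⟩

-- ===== VERDICT (by name: the statement is the Claim_ definition above) =====
theorem coutSameAndDifferend_spec : Claim_equal_coutSameAndDifferend := by
  intro preds result _ hpre
  obtain ⟨h2, hrows⟩ := hpre
  unfold Spec_coutSameAndDifferend coutSameAndDifferend coutSameAndDifferend_alt
  have hmle : (preds.zip result).length ≤ preds.length := by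
    simp [List.length_zip]
  have hrow' : ∀ x ∈ preds.zip result, (x.1.zip x.2).length = x.1.length := by
    intro x hx
    obtain ⟨i, hi, hxi⟩ := List.mem_iff_getElem.mp hx
    have hip : i < preds.length := by simp [List.length_zip] at hi; omega
    have hir : i < result.length := by simp [List.length_zip] at hi; omega
    rw [List.getElem_zip] at hxi
    rcases hrows i hip with hnil | ⟨_, hle⟩
    · rw [List.getD_eq_getElem _ _ hip] at hnil
      subst hxi; simp [hnil]
    · rw [List.getD_eq_getElem _ _ hip, List.getD_eq_getElem _ _ hir] at hle
      subst hxi; simp [List.length_zip]; omega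
  rw [PySem.List.pyRange_one_append 0 (((preds.zip result).length : Nat) : Int)
        ((preds.length : Nat) : Int) (by positivity) (by exact_mod_cast hmle),
      List.foldl_append]
  rw [pvFoldlFix _ _ _ (by
    intro i hi s
    rw [PySem.List.mem_pyRange_one] at hi
    have h0i : 0 ≤ i := le_trans (by positivity) hi.1
    have hip : i.toNat < preds.length := by omega
    have hmin : ¬ (i.toNat < result.length) := by
      intro hcon
      have : ((preds.zip result).length : Int) ≤ i := hi.1
      simp [List.length_zip] at this
      omega
    have hnil : preds.getD i.toNat [] = [] := by
      rcases hrows i.toNat hip with h | ⟨h, _⟩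
      · exact h
      · exact absurd h hmin
    have hgp : PySem.List.pyGetD preds i [] = [] := by
      rw [PySem.List.pyGetD_eq_getElem _ _ h0i (by omega)]
      rw [List.getD_eq_getElem _ _ hip] at hnil
      exact hnil
    rw [hgp]
    simp [PySem.List.pyRange_one_eq_nil])]
  have H := pvFoldlRangeZip
    (g := fun st (p r : List Int) =>
      (PySem.List.pyRange 0 (p.length : Int) 1).foldl
        (fun st j =>
          if PySem.List.pyGetD r j 0 = 1 ∧ PySem.List.pyGetD p j 0 = 1 then
            (st.1 + 1, st.2.1 + 1, st.2.2.1, st.2.2.2)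
          else if PySem.List.pyGetD r j 0 = 1 ∧ PySem.List.pyGetD p j 0 = 0 then
            (st.1 + 1, st.2.1, st.2.2.1, st.2.2.2 + 1)
          else if PySem.List.pyGetD r j 0 = 0 ∧ PySem.List.pyGetD p j 0 = 1 then
            (st.1, st.2.1, st.2.2.1 + 1, st.2.2.2)
          else st)
        st)
    ([] : List Int) ([] : List Int) ((preds.zip result).length) 0 preds result
    ((0, 0, 0, 0) : Int × Int × Int × Int) (by omega)
  simp only [Nat.cast_zero, List.drop_zero] at H
  rw [H, pvOuter (preds.zip result) hrow' 0 0 0 0]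
  have hinj : Function.Injective (fun y : Int × Int => (y.2, y.1)) := by
    intro a b hab
    simp only [Prod.mk.injEq] at hab
    exact Prod.ext hab.2 hab.1
  have c11 : ((preds.zip result).flatMap (fun x => x.1.zip x.2) |>.map (fun y => (y.2, y.1))).count (1, 1)
      = ((preds.zip result).flatMap (fun x => x.1.zip x.2)).count (1, 1) :=
    List.count_map_of_injective _ _ hinj (1, 1)
  have c10 : ((preds.zip result).flatMap (fun x => x.1.zip x.2) |>.map (fun y => (y.2, y.1))).count (1, 0)
      = ((preds.zip result).flatMap (fun x => x.1.zip x.2)).count (0, 1) :=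
    List.count_map_of_injective _ _ hinj (0, 1)
  have c01 : ((preds.zip result).flatMap (fun x => x.1.zip x.2) |>.map (fun y => (y.2, y.1))).count (0, 1)
      = ((preds.zip result).flatMap (fun x => x.1.zip x.2)).count (1, 0) :=
    List.count_map_of_injective _ _ hinj (1, 0)
  simp only [← List.map_flatMap]
  simp only [c11, c10, c01]
  simp only [Prod.mk.injEq, true_and]
  omega
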